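-- pv_equiv track=rewrite | github.com/batistagroup/DirectMultiStep | src/directmultistep/utils/post_process.py | calculate_top_k_counts_by_step_length
-- ===== SOURCE A (Python) =====
-- def calculate_top_k_counts_by_step_length(
--     match_accuracy: list[int | None], n_steps_list: list[int], k_vals: list[int]
-- ) -> dict[int, dict[str, int]]:
--     """Calculate accuracy statistics grouped by number of steps.
--
--     Args:
--         match_accuracy: List of ranks at which each path was found (None if not
--             found)
--         n_steps_list: List of number of steps for each path
--         k_vals: List of k values to calculate top-k accuracy for
--
--     Returns:
--         Dictionary mapping step count to accuracy statistics
--     """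
--     step_stats: dict[int, dict[str, int]] = {}
--
--     for rank, n_steps in zip(match_accuracy, n_steps_list):
--         if n_steps not in step_stats:
--             step_stats[n_steps] = {"Total": 0}
--
--         step_stats[n_steps]["Total"] += 1
--
--         if rank is None:
--             step_stats[n_steps]["Not Found"] = step_stats[n_steps].get("Not Found", 0) + 1
--         else:
--             for k in k_vals:
--                 if rank <= k:
--                     step_stats[n_steps][f"Top {k}"] = step_stats[n_steps].get(f"Top {k}", 0) + 1
--
--     return step_stats
-- ===== SOURCE B (Python) =====
-- def calculate_top_k_counts_by_step_length(
--     match_accuracy: list[int | None], n_steps_list: list[int], k_vals: list[int]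
-- ) -> dict[int, dict[str, int]]:
--     groups: dict = {}
--     for rank, n_steps in zip(match_accuracy, n_steps_list):
--         groups.setdefault(n_steps, []).append(rank)
--
--     result: dict = {}
--     for n_steps, ranks in groups.items():
--         stats = {"Total": len(ranks)}
--         for rank in ranks:
--             if rank is None:
--                 labels = ["Not Found"]
--             else:
--                 labels = [f"Top {k}" for k in k_vals if rank <= k]
--             for label in labels:
--                 stats[label] = stats.get(label, 0) + 1
--         result[n_steps] = stats
--     return result
-- ===== Notes on version B (the rewrite author's own statement) =====
-- stated objective: simpler
-- what changed: B splits the work into two phases: one pass grouping the ranks by step count, then an independent tally of each group where Total is the group size and each record contributes a small label list ('Not Found' or the 'Top k' strings), replacing A's single streaming pass with nested conditional dict increments.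
import Mathlib
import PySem

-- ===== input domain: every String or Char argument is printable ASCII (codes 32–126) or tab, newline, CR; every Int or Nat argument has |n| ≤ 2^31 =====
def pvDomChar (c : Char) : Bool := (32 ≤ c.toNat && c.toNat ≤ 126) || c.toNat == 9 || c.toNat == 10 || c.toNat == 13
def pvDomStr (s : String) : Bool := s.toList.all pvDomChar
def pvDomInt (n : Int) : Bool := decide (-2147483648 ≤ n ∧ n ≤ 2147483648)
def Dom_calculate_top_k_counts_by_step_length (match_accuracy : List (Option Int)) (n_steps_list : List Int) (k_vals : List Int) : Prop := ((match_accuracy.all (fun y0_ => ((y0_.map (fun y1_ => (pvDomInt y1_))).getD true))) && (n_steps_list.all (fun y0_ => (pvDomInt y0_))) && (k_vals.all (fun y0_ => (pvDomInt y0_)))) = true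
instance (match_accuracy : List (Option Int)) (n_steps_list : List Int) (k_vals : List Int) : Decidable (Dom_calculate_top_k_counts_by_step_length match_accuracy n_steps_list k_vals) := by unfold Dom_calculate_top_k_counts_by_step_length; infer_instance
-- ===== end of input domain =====

-- B groups the records by step count first and then tallies each group from per-record
-- label lists, with Total taken as the group size (objective: simpler decomposition, same cost).


-- ===== PORT A =====
def calculate_top_k_counts_by_step_length (match_accuracy : List (Option Int)) (n_steps_list : List Int) (k_vals : List Int) : List (Int × List (String × Int)) :=
  let step_stats : PySem.Dict Int (PySem.Dict String Int) :=
    (match_accuracy.zip n_steps_list).foldl (fun step_stats p =>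
      -- if n_steps not in step_stats: step_stats[n_steps] = {"Total": 0}
      let step_stats :=
        if step_stats.contains p.2 then step_stats
        else step_stats.insert p.2 (PySem.Dict.ofList [("Total", (0 : Int))])
      -- step_stats[n_steps]["Total"] += 1   (key always present here)
      let step_stats :=
        step_stats.modify p.2 PySem.Dict.empty (fun inner => inner.modify "Total" 0 (· + 1))
      match p.1 with
      | none =>
        step_stats.modify p.2 PySem.Dict.empty
          (fun inner => inner.insert "Not Found" (inner.getD "Not Found" 0 + 1))
      | some rank =>
        k_vals.foldl (fun ss k =>
          if rank ≤ k then
            ss.modify p.2 PySem.Dict.empty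
              (fun inner => inner.insert ("Top " ++ PySem.Int.toStr k)
                (inner.getD ("Top " ++ PySem.Int.toStr k) 0 + 1))
          else ss) step_stats) PySem.Dict.empty
  step_stats.items.map (fun q => (q.1, q.2.items))

-- ===== PORT B =====
def calculate_top_k_counts_by_step_length_alt (match_accuracy : List (Option Int)) (n_steps_list : List Int) (k_vals : List Int) : List (Int × List (String × Int)) :=
  -- groups.setdefault(n_steps, []).append(rank)
  let groups : PySem.Dict Int (List (Option Int)) :=
    (match_accuracy.zip n_steps_list).foldl (fun groups p =>
      (groups.setdefault p.2 []).modify p.2 [] (· ++ [p.1])) PySem.Dict.empty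
  let result : PySem.Dict Int (PySem.Dict String Int) :=
    groups.items.foldl (fun result q =>
      let stats : PySem.Dict String Int := q.2.foldl (fun stats rank =>
        let labels : List String :=
          match rank with
          | none => ["Not Found"]
          | some rv => (k_vals.filter (fun k => decide (rv ≤ k))).map (fun k => "Top " ++ PySem.Int.toStr k)
        labels.foldl (fun stats label => stats.insert label (stats.getD label 0 + 1)) stats)
        (PySem.Dict.ofList [("Total", (q.2.length : Int))])
      result.insert q.1 stats) PySem.Dict.empty
  result.items.map (fun q => (q.1, q.2.items))

-- ===== PRECONDITION & SPEC =====
def Spec_calculate_top_k_counts_by_step_length (match_accuracy : List (Option Int)) (n_steps_list : List Int) (k_vals : List Int) (out : List (Int × List (String × Int))) : Prop := out = calculate_top_k_counts_by_step_length_alt match_accuracy n_steps_list k_vals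
instance (match_accuracy : List (Option Int)) (n_steps_list : List Int) (k_vals : List Int) (out : List (Int × List (String × Int))) : Decidable (Spec_calculate_top_k_counts_by_step_length match_accuracy n_steps_list k_vals out) := by unfold Spec_calculate_top_k_counts_by_step_length; infer_instance

-- ===== CLAIM (what is proved, stated in full; the proofs are below) =====
def Claim_equal_calculate_top_k_counts_by_step_length : Prop := ∀ (match_accuracy : List (Option Int)) (n_steps_list : List Int) (k_vals : List Int), Dom_calculate_top_k_counts_by_step_length match_accuracy n_steps_list k_vals → Spec_calculate_top_k_counts_by_step_length match_accuracy n_steps_list k_vals (calculate_top_k_counts_by_step_length match_accuracy n_steps_list k_vals)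

-- ===== LEMMAS AND PROOFS =====

-- ==== B's inner tally, named pieces ====
def pvInc (stats : PySem.Dict String Int) (label : String) : PySem.Dict String Int :=
  stats.insert label (stats.getD label 0 + 1)

def pvLabels (k_vals : List Int) : Option Int → List String
  | none => ["Not Found"]
  | some rv => (k_vals.filter (fun k => decide (rv ≤ k))).map (fun k => "Top " ++ PySem.Int.toStr k)

def pvBStep (k_vals : List Int) (stats : PySem.Dict String Int) (r : Option Int) : PySem.Dict String Int :=
  (pvLabels k_vals r).foldl pvInc stats

def pvInner (k_vals : List Int) (rs : List (Option Int)) : PySem.Dict String Int :=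
  rs.foldl (pvBStep k_vals) (PySem.Dict.ofList [("Total", (rs.length : Int))])

-- "bump Total by n"
def pvAddT (n : Int) (s : PySem.Dict String Int) : PySem.Dict String Int :=
  s.insert "Total" (s.getD "Total" 0 + n)

-- A's combined per-record inner update
def pvAInner (k_vals : List Int) (r : Option Int) (inner : PySem.Dict String Int) : PySem.Dict String Int :=
  match r with
  | none =>
    let d := inner.modify "Total" 0 (· + 1)
    d.insert "Not Found" (d.getD "Not Found" 0 + 1)
  | some rank =>
    k_vals.foldl (fun d k =>
      if rank ≤ k then d.insert ("Top " ++ PySem.Int.toStr k) (d.getD ("Top " ++ PySem.Int.toStr k) 0 + 1)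
      else d) (inner.modify "Total" 0 (· + 1))

theorem pv_label_ne_total (kv : List Int) (r : Option Int) : ∀ l ∈ pvLabels kv r, l ≠ "Total" := by
  intro l hl
  cases r with
  | none =>
    simp only [pvLabels, List.mem_cons, List.not_mem_nil, or_false] at hl
    subst hl; decide
  | some rv =>
    simp only [pvLabels, List.mem_map, List.mem_filter] at hl
    obtain ⟨k, _, hk⟩ := hl
    subst hk
    intro h
    have := congrArg String.toList h
    simp [String.toList_append] at this

-- inserts at distinct keys commute when the first key is already present
theorem pv_insert_comm {κ ν : Type} [BEq κ] [LawfulBEq κ] (d : PySem.Dict κ ν) (k1 k2 : κ)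
    (v1 v2 : ν) (hne : k1 ≠ k2) (h1 : d.contains k1 = true) :
    (d.insert k1 v1).insert k2 v2 = (d.insert k2 v2).insert k1 v1 := by
  have h1' : ∀ v, (d.insert k2 v).contains k1 = true := by
    intro v; rw [PySem.Dict.contains_insert]; simp [h1]
  by_cases h2 : d.contains k2 = true
  · have h2' : (d.insert k1 v1).contains k2 = true := by
      rw [PySem.Dict.contains_insert]; simp [h2]
    apply PySem.Dict.ext
    rw [PySem.Dict.items_insert_of_contains _ _ h2', PySem.Dict.items_insert_of_contains _ _ h1,
      PySem.Dict.items_insert_of_contains _ _ (h1' v2), PySem.Dict.items_insert_of_contains _ _ h2]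
    rw [List.map_map, List.map_map]
    apply List.map_congr_left
    intro p _
    by_cases hp1 : (p.1 == k1) = true
    · have : p.1 = k1 := by simpa using hp1
      have hp2 : (p.1 == k2) = false := by simp [this, hne]
      simp [Function.comp_apply, this, hne]
    · by_cases hp2 : (p.1 == k2) = true
      · have : p.1 = k2 := by simpa using hp2
        have hne' : ¬ (k2 == k1) = true := by simp [Ne.symm hne]
        simp [Function.comp_apply, hp1, hp2, hne']
      · simp [Function.comp_apply, hp1, hp2]
  · have h2f : d.contains k2 = false := by simpa using h2
    have h2' : (d.insert k1 v1).contains k2 = false := by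
      rw [PySem.Dict.contains_insert]
      simp [h2f, Ne.symm hne]
    apply PySem.Dict.ext
    rw [PySem.Dict.items_insert_of_not_contains _ _ h2', PySem.Dict.items_insert_of_contains _ _ h1,
      PySem.Dict.items_insert_of_contains _ _ (h1' v2), PySem.Dict.items_insert_of_not_contains _ _ h2f]
    rw [List.map_append]
    congr 1
    have hk2 : ((k2, v2).1 == k1) = false := by simp [Ne.symm hne]
    simp [hk2]

theorem pv_contains_inc (s : PySem.Dict String Int) (l k : String) (h : s.contains k = true) :
    (pvInc s l).contains k = true := by
  rw [pvInc, PySem.Dict.contains_insert]; simp [h]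

theorem pv_contains_foldInc (ls : List String) : ∀ (s : PySem.Dict String Int) (k : String),
    s.contains k = true → (ls.foldl pvInc s).contains k = true := by
  induction ls with
  | nil => intro s k h; simpa using h
  | cons l t ih => intro s k h; exact ih _ _ (pv_contains_inc s l k h)

theorem pv_inc_addT (s : PySem.Dict String Int) (l : String) (n : Int)
    (hl : l ≠ "Total") (hc : s.contains "Total" = true) :
    pvInc (pvAddT n s) l = pvAddT n (pvInc s l) := by
  rw [pvInc, pvAddT, PySem.Dict.getD_insert_of_ne _ _ _ hl,
    pv_insert_comm s "Total" l _ _ (Ne.symm hl) hc,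
    pvAddT, pvInc, PySem.Dict.getD_insert_of_ne _ _ _ (Ne.symm hl)]

theorem pv_foldInc_addT (ls : List String) : ∀ (s : PySem.Dict String Int) (n : Int),
    (∀ l ∈ ls, l ≠ "Total") → s.contains "Total" = true →
    ls.foldl pvInc (pvAddT n s) = pvAddT n (ls.foldl pvInc s) := by
  induction ls with
  | nil => intro s n _ _; rfl
  | cons l t ih =>
    intro s n hls hc
    simp only [List.foldl_cons]
    rw [pv_inc_addT s l n (hls l (by simp)) hc]
    exact ih _ n (fun l' hl' => hls l' (by simp [hl'])) (pv_contains_inc s l "Total" hc)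

theorem pv_bstep_addT (kv : List Int) (s : PySem.Dict String Int) (r : Option Int) (n : Int)
    (hc : s.contains "Total" = true) :
    pvBStep kv (pvAddT n s) r = pvAddT n (pvBStep kv s r) :=
  pv_foldInc_addT (pvLabels kv r) s n (pv_label_ne_total kv r) hc

theorem pv_contains_bstep (kv : List Int) (s : PySem.Dict String Int) (r : Option Int)
    (hc : s.contains "Total" = true) : (pvBStep kv s r).contains "Total" = true :=
  pv_contains_foldInc (pvLabels kv r) s "Total" hc

theorem pv_fold_bstep_addT (kv : List Int) (rs : List (Option Int)) : ∀ (s : PySem.Dict String Int) (n : Int),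
    s.contains "Total" = true →
    rs.foldl (pvBStep kv) (pvAddT n s) = pvAddT n (rs.foldl (pvBStep kv) s) := by
  induction rs with
  | nil => intro s n _; rfl
  | cons r t ih =>
    intro s n hc
    simp only [List.foldl_cons]
    rw [pv_bstep_addT kv s r n hc]
    exact ih _ n (pv_contains_bstep kv s r hc)

-- A's inner per-record update is B's label tally after bumping Total
theorem pv_fold_if_eq_foldInc (rank : Int) (kv : List Int) : ∀ (d : PySem.Dict String Int),
    kv.foldl (fun d k =>
      if rank ≤ k then d.insert ("Top " ++ PySem.Int.toStr k) (d.getD ("Top " ++ PySem.Int.toStr k) 0 + 1)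
      else d) d
    = ((kv.filter (fun k => decide (rank ≤ k))).map (fun k => "Top " ++ PySem.Int.toStr k)).foldl pvInc d := by
  induction kv with
  | nil => intro d; rfl
  | cons k t ih =>
    intro d
    by_cases h : rank ≤ k
    · simp only [List.foldl_cons, List.filter_cons, h, decide_true, if_true, List.map_cons]
      exact ih _
    · simp only [List.foldl_cons, List.filter_cons, h, decide_false, if_false]
      exact ih _

theorem pv_modify_total (s : PySem.Dict String Int) :
    s.modify "Total" 0 (· + 1) = pvAddT 1 s := rfl

theorem pv_ainner_eq (kv : List Int) (r : Option Int) (s : PySem.Dict String Int) :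
    pvAInner kv r s = pvBStep kv (pvAddT 1 s) r := by
  cases r with
  | none => rfl
  | some rank =>
    show kv.foldl _ (s.modify "Total" 0 (· + 1)) = _
    rw [pv_modify_total, pv_fold_if_eq_foldInc]
    rfl

theorem pv_contains_total_init (L : Int) :
    (PySem.Dict.ofList [("Total", L)] : PySem.Dict String Int).contains "Total" = true := by
  simp [PySem.Dict.ofList, PySem.Dict.update]

theorem pv_init_succ (L : Int) :
    (PySem.Dict.ofList [("Total", L + 1)] : PySem.Dict String Int)
      = pvAddT 1 (PySem.Dict.ofList [("Total", L)]) := by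
  apply PySem.Dict.ext
  rw [pvAddT]
  rw [PySem.Dict.items_insert_of_contains _ _ (pv_contains_total_init L)]
  have hget : (PySem.Dict.ofList [("Total", L)] : PySem.Dict String Int).getD "Total" 0 = L := by
    simp [PySem.Dict.ofList, PySem.Dict.update, PySem.Dict.getD_insert_self]
  rw [hget]
  rfl

-- ==== the core per-record lemma ====
theorem pv_core (kv : List Int) (rs : List (Option Int)) (r : Option Int) :
    pvAInner kv r (pvInner kv rs) = pvInner kv (rs ++ [r]) := by
  rw [pvInner, pvInner, List.foldl_append, List.foldl_cons, List.foldl_nil]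
  have hlen : (((rs ++ [r]).length : Nat) : Int) = ((rs.length : Nat) : Int) + 1 := by
    simp
  rw [hlen, pv_init_succ,
    pv_fold_bstep_addT kv rs _ 1 (pv_contains_total_init _),
    pv_ainner_eq]

-- ==== generic Dict lemmas for the outer fold ====
theorem pv_modify_modify_self {κ ν : Type} [BEq κ] [LawfulBEq κ] (d : PySem.Dict κ ν) (k : κ) (d0 : ν) (f g : ν → ν) :
    (d.modify k d0 f).modify k d0 g = d.modify k d0 (fun v => g (f v)) := by
  rw [PySem.Dict.modify, PySem.Dict.modify, PySem.Dict.modify]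
  rw [PySem.Dict.getD_insert_self]
  exact PySem.Dict.insert_insert_self d k _ _

theorem pv_modify_id {κ ν : Type} [BEq κ] [LawfulBEq κ] (d : PySem.Dict κ ν) (k : κ) (d0 : ν)
    (hc : d.contains k = true) (hnd : d.keys.Nodup) : d.modify k d0 (fun v => v) = d := by
  apply PySem.Dict.ext
  rw [PySem.Dict.modify, PySem.Dict.insert, if_pos hc]
  show List.map _ d.items = d.items
  conv_rhs => rw [← List.map_id d.items]
  apply List.map_congr_left
  intro p hp
  by_cases hk : (p.1 == k) = true
  · have hk' : p.1 = k := by simpa using hk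
    have hmem : (k, p.2) ∈ d.items := by
      rw [← hk']
      simpa using hp
    have hval : d.getD k d0 = p.2 := PySem.Dict.getD_of_mem_items d hmem hnd d0
    rw [if_pos hk, hval, ← hk']
    simp
  · simp [hk]

theorem pv_nodup_keys_modify {κ ν : Type} [BEq κ] [LawfulBEq κ] (d : PySem.Dict κ ν) (k : κ) (d0 : ν) (f : ν → ν)
    (h : d.keys.Nodup) : (d.modify k d0 f).keys.Nodup := by
  rw [PySem.Dict.keys_modify]
  exact PySem.Dict.nodup_keys_insert _ _ _ h

theorem pv_foldl_if_modify {κ ν α : Type} [BEq κ] [LawfulBEq κ] (c : α → Prop) [DecidablePred c] :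
    ∀ (l : List α) (d : PySem.Dict κ ν) (k : κ) (d0 : ν) (F : α → ν → ν),
    d.contains k = true → d.keys.Nodup →
    l.foldl (fun d a => if c a then d.modify k d0 (F a) else d) d
      = d.modify k d0 (fun v => l.foldl (fun v a => if c a then F a v else v) v) := by
  intro l
  induction l with
  | nil =>
    intro d k d0 F hc hnd
    simp only [List.foldl_nil]
    exact (pv_modify_id d k d0 hc hnd).symm
  | cons a t ih =>
    intro d k d0 F hc hnd
    simp only [List.foldl_cons]
    by_cases ha : c a
    · rw [if_pos ha]
      rw [ih _ k d0 F (by rw [PySem.Dict.contains_modify]; simp) (by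
        rw [PySem.Dict.keys_modify, PySem.Dict.insert, if_pos hc]
        show (List.map _ d.items).map _ |>.Nodup
        rw [List.map_map]
        have : ((fun (x : κ × ν) => x.1) ∘ fun p => if (p.1 == k) = true then (k, F a (d.getD k d0)) else p)
            = fun (x : κ × ν) => x.1 := by
          funext p
          by_cases hk : (p.1 == k) = true
          · simp only [Function.comp_apply, hk, if_true]
            exact (by simpa using hk : p.1 = k).symm
          · simp [hk]
        rw [this]
        exact hnd)]
      rw [pv_modify_modify_self]
      congr 1
      funext v
      rw [if_pos ha]
    · rw [if_neg ha, ih _ k d0 F hc hnd]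
      congr 1
      funext v
      rw [if_neg ha]

-- ==== outer layer ====
def pvAStep (kv : List Int) (step_stats : PySem.Dict Int (PySem.Dict String Int)) (p : Option Int × Int) : PySem.Dict Int (PySem.Dict String Int) :=
  let step_stats :=
    if step_stats.contains p.2 then step_stats
    else step_stats.insert p.2 (PySem.Dict.ofList [("Total", (0 : Int))])
  let step_stats :=
    step_stats.modify p.2 PySem.Dict.empty (fun inner => inner.modify "Total" 0 (· + 1))
  match p.1 with
  | none =>
    step_stats.modify p.2 PySem.Dict.empty
      (fun inner => inner.insert "Not Found" (inner.getD "Not Found" 0 + 1))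
  | some rank =>
    kv.foldl (fun ss k =>
      if rank ≤ k then
        ss.modify p.2 PySem.Dict.empty
          (fun inner => inner.insert ("Top " ++ PySem.Int.toStr k)
            (inner.getD ("Top " ++ PySem.Int.toStr k) 0 + 1))
      else ss) step_stats

def pvGStep (groups : PySem.Dict Int (List (Option Int))) (p : Option Int × Int) : PySem.Dict Int (List (Option Int)) :=
  (groups.setdefault p.2 []).modify p.2 [] (· ++ [p.1])

def pvAggr (kv : List Int) (G : PySem.Dict Int (List (Option Int))) : PySem.Dict Int (PySem.Dict String Int) :=
  PySem.Dict.mk (G.items.map (fun q => (q.1, pvInner kv q.2)))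

theorem pv_gstep_eq (G : PySem.Dict Int (List (Option Int))) (r : Option Int) (n : Int) :
    pvGStep G (r, n) = G.insert n (G.getD n [] ++ [r]) := by
  rw [pvGStep]
  by_cases hc : G.contains n = true
  · rw [PySem.Dict.setdefault_of_contains _ _ hc, PySem.Dict.modify]
  · have hc' : G.contains n = false := by simpa using hc
    rw [PySem.Dict.setdefault_of_not_contains _ _ hc', PySem.Dict.modify,
      PySem.Dict.getD_insert_self, PySem.Dict.insert_insert_self,
      PySem.Dict.getD_of_not_contains _ _ hc']

theorem pv_astep_eq (kv : List Int) (d : PySem.Dict Int (PySem.Dict String Int)) (r : Option Int) (n : Int)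
    (hnd : d.keys.Nodup) :
    pvAStep kv d (r, n)
      = (if d.contains n then d else d.insert n (PySem.Dict.ofList [("Total", (0 : Int))])).modify n PySem.Dict.empty (pvAInner kv r) := by
  have hc1 : (if d.contains n then d else d.insert n (PySem.Dict.ofList [("Total", (0 : Int))])).contains n = true := by
    split_ifs with h
    · exact h
    · exact PySem.Dict.contains_insert_self d n _
  have hnd1 : (if d.contains n then d else d.insert n (PySem.Dict.ofList [("Total", (0 : Int))])).keys.Nodup := by
    split_ifs with h
    · exact hnd
    · exact PySem.Dict.nodup_keys_insert _ _ _ hnd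
  cases r with
  | none =>
    have hrfl : pvAStep kv d (none, n)
        = ((if d.contains n then d else d.insert n (PySem.Dict.ofList [("Total", (0 : Int))])).modify n PySem.Dict.empty
            (fun inner => inner.modify "Total" 0 (· + 1))).modify n PySem.Dict.empty
            (fun inner => inner.insert "Not Found" (inner.getD "Not Found" 0 + 1)) := rfl
    rw [hrfl, pv_modify_modify_self]
    rfl
  | some rank =>
    have hrfl : pvAStep kv d (some rank, n)
        = kv.foldl (fun ss k =>
            if rank ≤ k then
              ss.modify n PySem.Dict.empty
                (fun inner => inner.insert ("Top " ++ PySem.Int.toStr k)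
                  (inner.getD ("Top " ++ PySem.Int.toStr k) 0 + 1))
            else ss)
          ((if d.contains n then d else d.insert n (PySem.Dict.ofList [("Total", (0 : Int))])).modify n PySem.Dict.empty
            (fun inner => inner.modify "Total" 0 (· + 1))) := rfl
    rw [hrfl, pv_foldl_if_modify (fun k => rank ≤ k) kv _ n PySem.Dict.empty _
      (by rw [PySem.Dict.contains_modify]; simp)
      (pv_nodup_keys_modify _ _ _ _ hnd1)]
    rw [pv_modify_modify_self]
    rfl

theorem pv_aggr_contains (kv : List Int) (G : PySem.Dict Int (List (Option Int))) (n : Int) :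
    (pvAggr kv G).contains n = G.contains n := by
  simp only [pvAggr, PySem.Dict.contains, List.any_map]
  rfl

theorem pv_aggr_get (kv : List Int) (G : PySem.Dict Int (List (Option Int))) (n : Int) :
    (pvAggr kv G).get? n = (G.get? n).map (pvInner kv) := by
  simp only [pvAggr, PySem.Dict.get?, List.find?_map, Option.map_map]
  rfl

theorem pv_aggr_insert (kv : List Int) (G : PySem.Dict Int (List (Option Int))) (n : Int) (v : List (Option Int)) :
    pvAggr kv (G.insert n v) = (pvAggr kv G).insert n (pvInner kv v) := by
  apply PySem.Dict.ext
  show List.map _ (G.insert n v).items = ((pvAggr kv G).insert n (pvInner kv v)).items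
  by_cases hc : G.contains n = true
  · rw [PySem.Dict.items_insert_of_contains G v hc,
      PySem.Dict.items_insert_of_contains (pvAggr kv G) (pvInner kv v) (by rw [pv_aggr_contains]; exact hc)]
    show _ = List.map _ (List.map _ G.items)
    rw [List.map_map, List.map_map]
    apply List.map_congr_left
    intro q _
    by_cases hq : q.1 = n <;> simp [hq]
  · have hc' : G.contains n = false := by simpa using hc
    rw [PySem.Dict.items_insert_of_not_contains G v hc',
      PySem.Dict.items_insert_of_not_contains (pvAggr kv G) (pvInner kv v) (by rw [pv_aggr_contains]; exact hc')]
    show List.map _ (G.items ++ [(n, v)]) = _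
    rw [List.map_append]
    rfl

theorem pv_commute (kv : List Int) (G : PySem.Dict Int (List (Option Int))) (r : Option Int) (n : Int)
    (hnd : G.keys.Nodup) :
    pvAStep kv (pvAggr kv G) (r, n) = pvAggr kv (pvGStep G (r, n)) := by
  have hndA : (pvAggr kv G).keys.Nodup := by
    have hkeys : (pvAggr kv G).keys = G.keys := by
      simp only [pvAggr, PySem.Dict.keys, List.map_map]
      rfl
    rw [hkeys]; exact hnd
  rw [pv_astep_eq kv _ r n hndA, pv_aggr_contains, pv_gstep_eq]
  by_cases hc : G.contains n = true
  · rw [if_pos hc]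
    have hget : G.get? n = some (G.getD n []) := by
      have hiso := PySem.Dict.contains_eq_isSome_get? (d := G) (k := n)
      rw [hc] at hiso
      cases hg : G.get? n with
      | none => rw [hg] at hiso; simp at hiso
      | some rs => rw [PySem.Dict.getD, hg]; rfl
    have hmod : (pvAggr kv G).modify n PySem.Dict.empty (pvAInner kv r)
        = (pvAggr kv G).insert n (pvAInner kv r (pvInner kv (G.getD n []))) := by
      rw [PySem.Dict.modify]
      congr 1
      rw [PySem.Dict.getD, pv_aggr_get, hget]
      rfl
    rw [hmod, pv_core, pv_aggr_insert]
  · have hc' : G.contains n = false := by simpa using hc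
    rw [if_neg (by simp [hc'])]
    rw [PySem.Dict.modify, PySem.Dict.getD, PySem.Dict.get?_insert_self]
    show ((pvAggr kv G).insert n _).insert n (pvAInner kv r (PySem.Dict.ofList [("Total", (0 : Int))])) = _
    rw [PySem.Dict.insert_insert_self]
    have h0 : (PySem.Dict.ofList [("Total", (0 : Int))] : PySem.Dict String Int) = pvInner kv [] := rfl
    rw [h0, pv_core, pv_aggr_insert, PySem.Dict.getD_of_not_contains _ _ hc', List.nil_append]

theorem pv_gstep_nodup (G : PySem.Dict Int (List (Option Int))) (p : Option Int × Int)
    (hnd : G.keys.Nodup) : (pvGStep G p).keys.Nodup := by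
  rw [pv_gstep_eq G p.1 p.2]
  exact PySem.Dict.nodup_keys_insert _ _ _ hnd

theorem pv_main (kv : List Int) : ∀ (l : List (Option Int × Int)) (G : PySem.Dict Int (List (Option Int))),
    G.keys.Nodup → l.foldl (pvAStep kv) (pvAggr kv G) = pvAggr kv (l.foldl pvGStep G) := by
  intro l
  induction l with
  | nil => intro G _; rfl
  | cons p t ih =>
    intro G hnd
    simp only [List.foldl_cons]
    rw [pv_commute kv G p.1 p.2 hnd, ih _ (pv_gstep_nodup G _ hnd)]

theorem pv_groups_nodup (l : List (Option Int × Int)) :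
    (l.foldl pvGStep PySem.Dict.empty).keys.Nodup := by
  suffices h : ∀ G : PySem.Dict Int (List (Option Int)), G.keys.Nodup → (l.foldl pvGStep G).keys.Nodup by
    exact h _ PySem.Dict.nodup_keys_empty
  induction l with
  | nil => intro G h; simpa using h
  | cons p t ih => intro G h; exact ih _ (pv_gstep_nodup G p h)

theorem pv_main0 (kv : List Int) (l : List (Option Int × Int)) :
    l.foldl (pvAStep kv) PySem.Dict.empty = pvAggr kv (l.foldl pvGStep PySem.Dict.empty) :=
  pv_main kv l PySem.Dict.empty PySem.Dict.nodup_keys_empty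

theorem pv_final (ma : List (Option Int)) (ns : List Int) (kv : List Int) :
    calculate_top_k_counts_by_step_length ma ns kv = calculate_top_k_counts_by_step_length_alt ma ns kv := by
  have hA : calculate_top_k_counts_by_step_length ma ns kv
      = ((ma.zip ns).foldl (pvAStep kv) PySem.Dict.empty).items.map (fun q => (q.1, q.2.items)) := rfl
  have hB : calculate_top_k_counts_by_step_length_alt ma ns kv
      = (((ma.zip ns).foldl pvGStep PySem.Dict.empty).items.foldl
          (fun (result : PySem.Dict Int (PySem.Dict String Int)) q => result.insert q.1 (pvInner kv q.2))
          PySem.Dict.empty).items.map (fun q => (q.1, q.2.items)) := rfl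
  rw [hA, hB, pv_main0]
  congr 1
  rw [PySem.Dict.items_foldl_insert_fresh ((ma.zip ns).foldl pvGStep PySem.Dict.empty).items
    (fun q => q.1) (fun q => pvInner kv q.2) PySem.Dict.empty
    (fun a _ => rfl) (pv_groups_nodup (ma.zip ns))]
  rfl

-- ===== VERDICT (by name: the statement is the Claim_ definition above) =====
theorem calculate_top_k_counts_by_step_length_spec : Claim_equal_calculate_top_k_counts_by_step_length := by
  intro match_accuracy n_steps_list k_vals _
  show calculate_top_k_counts_by_step_length match_accuracy n_steps_list k_vals
      = calculate_top_k_counts_by_step_length_alt match_accuracy n_steps_list k_vals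
  exact pv_final match_accuracy n_steps_list k_vals
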